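-- pv_equiv track=rewrite | github.com/ymakwanamath/BioSNOW | sboxprop.py | mobius_transform
-- ===== SOURCE A (Python) =====
-- def mobius_transform(vec):
--     a = vec[:]
--     n = (len(a)).bit_length() - 1
--     for i in range(n):
--         step = 1 << i
--         for mask in range(len(a)):
--             if mask & step:
--                 a[mask] ^= a[mask ^ step]
--     return a
-- ===== SOURCE B (Python) =====
-- def mobius_transform(vec):
--     # Direct definition: out[mask] = XOR of vec[t] over the submasks t of mask
--     # within the low n bits; the submask list is built by doubling over the set bits.
--     n = len(vec).bit_length() - 1
--     out = []
--     for mask in range(len(vec)):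
--         subs = [mask]
--         for j in range(n):
--             if (mask >> j) & 1:
--                 subs += [t ^ (1 << j) for t in subs]
--         acc = 0
--         for t in subs:
--             acc ^= vec[t]
--         out.append(acc)
--     return out
-- ===== Notes on version B (the rewrite author's own statement) =====
-- stated objective: alternative
-- what changed: B computes each output entry independently from the direct definition of the transform - out[mask] is the XOR of vec[t] over all t that are submasks of mask in the low n bits (the submask list built by doubling over mask's set bits) - instead of A's n layered in-place butterfly passes over the whole array.
import Mathlib
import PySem

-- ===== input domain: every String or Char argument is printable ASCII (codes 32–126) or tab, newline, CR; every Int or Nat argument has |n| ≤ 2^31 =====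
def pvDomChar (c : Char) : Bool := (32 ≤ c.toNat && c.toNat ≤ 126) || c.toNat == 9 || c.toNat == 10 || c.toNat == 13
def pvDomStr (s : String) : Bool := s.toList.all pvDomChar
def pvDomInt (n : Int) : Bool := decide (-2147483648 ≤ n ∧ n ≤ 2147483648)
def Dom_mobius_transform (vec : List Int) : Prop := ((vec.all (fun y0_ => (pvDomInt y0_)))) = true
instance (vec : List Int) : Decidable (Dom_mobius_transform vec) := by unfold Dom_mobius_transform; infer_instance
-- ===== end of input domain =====

-- B replaces A's in-place butterfly passes by the direct definition of the transform
-- (each entry is computed independently as an XOR over the submasks of its low bits,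
-- the submask list built by doubling over set bits); alternative decomposition.

-- ===== PORT A =====
-- one step of the inner loop: `if mask & step: a[mask] ^= a[mask ^ step]`  (a.getD is exact: every accessed index is < len(a))
def pvUpd (i : Nat) (a : List Int) (mask : Nat) : List Int :=
  let step := 1 <<< i
  if mask &&& step ≠ 0 then
    a.set mask (PySem.Int.bxor (a.getD mask 0) (a.getD (mask ^^^ step) 0))
  else a

-- one pass: `for mask in range(len(a)): ...`
def pvPass (i : Nat) (a : List Int) : List Int :=
  (List.range a.length).foldl (pvUpd i) a

def mobius_transform (vec : List Int) : List Int :=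
  -- n = len(a).bit_length() - 1; Python's n = -1 only when len = 0, where range(n) = [] = range 0,
  -- so Nat subtraction is exact here
  let n := PySem.Int.bitLength (vec.length : Int) - 1
  (List.range n).foldl (fun a i => pvPass i a) vec

-- ===== PORT B =====
def mobius_transform_alt (vec : List Int) : List Int :=
  let n := PySem.Int.bitLength (vec.length : Int) - 1
  (List.range vec.length).map (fun mask =>
    let subs := (List.range n).foldl (fun subs j =>
      if (mask >>> j) &&& 1 ≠ 0 then subs ++ subs.map (fun t => t ^^^ (1 <<< j)) else subs) [mask]
    subs.foldl (fun acc t => PySem.Int.bxor acc (vec.getD t 0)) 0)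

-- ===== PRECONDITION & SPEC =====
def Spec_mobius_transform (vec : List Int) (out : List Int) : Prop := out = mobius_transform_alt vec
instance (vec : List Int) (out : List Int) : Decidable (Spec_mobius_transform vec out) := by unfold Spec_mobius_transform; infer_instance

-- ===== CLAIM (what is proved, stated in full; the proofs are below) =====
def Claim_equal_mobius_transform : Prop := ∀ (vec : List Int), Dom_mobius_transform vec → Spec_mobius_transform vec (mobius_transform vec)

-- ===== LEMMAS AND PROOFS =====

-- Int xor: associativity, via the two's-complement encoding (sign, magnitude)
def pvEnc (s : Bool) (m : Nat) : Int := cond s (-(m : Int) - 1) (m : Int)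

theorem pvEnc_bxor (s1 : Bool) (m1 : Nat) (s2 : Bool) (m2 : Nat) :
    PySem.Int.bxor (pvEnc s1 m1) (pvEnc s2 m2) = pvEnc (s1 ^^ s2) (m1 ^^^ m2) := by
  cases s1 <;> cases s2 <;>
    simp only [pvEnc, Bool.xor_false, Bool.xor_true, Bool.not_false, Bool.not_true,
      cond_true, cond_false, PySem.Int.bxor]
  · rw [if_pos (Int.natCast_nonneg m1), if_pos (Int.natCast_nonneg m2)]
    simp
  · rw [if_pos (Int.natCast_nonneg m1), if_neg (by omega),
      show (-(-(m2 : Int) - 1) - 1) = (m2 : Int) by ring]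
    simp
  · rw [if_neg (by omega), if_pos (Int.natCast_nonneg m2),
      show (-(-(m1 : Int) - 1) - 1) = (m1 : Int) by ring]
    simp
  · rw [if_neg (by omega), if_neg (by omega),
      show (-(-(m1 : Int) - 1) - 1) = (m1 : Int) by ring,
      show (-(-(m2 : Int) - 1) - 1) = (m2 : Int) by ring]
    simp

theorem pvEnc_surj (a : Int) : ∃ s m, pvEnc s m = a := by
  by_cases h : 0 ≤ a
  · exact ⟨false, a.toNat, by simp [pvEnc]; omega⟩
  · exact ⟨true, (-a - 1).toNat, by simp [pvEnc]; omega⟩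

theorem pvBxor_assoc (a b c : Int) :
    PySem.Int.bxor (PySem.Int.bxor a b) c = PySem.Int.bxor a (PySem.Int.bxor b c) := by
  obtain ⟨sa, ma, rfl⟩ := pvEnc_surj a
  obtain ⟨sb, mb, rfl⟩ := pvEnc_surj b
  obtain ⟨sc, mc, rfl⟩ := pvEnc_surj c
  rw [pvEnc_bxor, pvEnc_bxor, pvEnc_bxor, pvEnc_bxor, Bool.xor_assoc, Nat.xor_assoc]

theorem pvZero_bxor (a : Int) : PySem.Int.bxor 0 a = a := by
  rw [PySem.Int.bxor_comm, PySem.Int.bxor_zero]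

-- XOR over a list of indices
def pvXorL (vec : List Int) (ts : List Nat) : Int :=
  ts.foldl (fun acc t => PySem.Int.bxor acc (vec.getD t 0)) 0

theorem pvFoldl_shift (vec : List Int) (ts : List Nat) (acc : Int) :
    ts.foldl (fun acc t => PySem.Int.bxor acc (vec.getD t 0)) acc =
      PySem.Int.bxor acc (pvXorL vec ts) := by
  induction ts generalizing acc with
  | nil => simp [pvXorL, PySem.Int.bxor_zero]
  | cons t ts ih =>
      simp only [pvXorL, List.foldl_cons]
      rw [ih, ih (PySem.Int.bxor 0 _), pvZero_bxor, pvBxor_assoc]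

theorem pvXorL_append (vec : List Int) (l1 l2 : List Nat) :
    pvXorL vec (l1 ++ l2) = PySem.Int.bxor (pvXorL vec l1) (pvXorL vec l2) := by
  unfold pvXorL
  rw [List.foldl_append, pvFoldl_shift]
  rfl

theorem pvXorL_perm (vec : List Int) {l1 l2 : List Nat} (h : l1.Perm l2) :
    pvXorL vec l1 = pvXorL vec l2 := by
  unfold pvXorL
  haveI : RightCommutative (fun (acc : Int) (t : Nat) => PySem.Int.bxor acc (vec.getD t 0)) :=
    ⟨fun b a1 a2 => by
      simp only [pvBxor_assoc]
      rw [PySem.Int.bxor_comm (vec.getD a1 0)]⟩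
  exact h.foldl_eq 0

-- submasks of m in the low i bits (high bits unchanged), listed increasingly
def pvSub (i m : Nat) : List Nat :=
  (List.range (m + 1)).filter (fun t => decide (t ||| m = m) && decide ((t ^^^ m) >>> i = 0))

theorem pvShiftR_zero (x i : Nat) : x >>> i = 0 ↔ ∀ j, i ≤ j → x.testBit j = false := by
  constructor
  · intro h j hj
    have h2 : (x >>> i).testBit (j - i) = false := by rw [h]; simp
    rw [Nat.testBit_shiftRight] at h2
    rwa [show i + (j - i) = j by omega] at h2
  · intro h
    apply Nat.eq_of_testBit_eq
    intro k
    rw [Nat.testBit_shiftRight]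
    simp [h (i + k) (by omega)]

theorem pvOr_sub {t m : Nat} (h : t ||| m = m) {j : Nat} (ht : t.testBit j = true) :
    m.testBit j = true := by
  rw [← h, Nat.testBit_or, ht]; simp

theorem pvSub_zero (m : Nat) : pvSub 0 m = [m] := by
  unfold pvSub
  have h1 : (List.range m).filter
      (fun t => decide (t ||| m = m) && decide ((t ^^^ m) >>> 0 = 0)) = [] := by
    rw [List.filter_eq_nil_iff]
    intro t ht
    have htm : t < m := List.mem_range.mp ht
    simp only [Bool.and_eq_true, decide_eq_true_eq, not_and, Nat.shiftRight_zero]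
    intro _ h0
    exact absurd (Nat.xor_eq_zero_iff.mp h0) (by omega)
  rw [show m + 1 = Nat.succ m from rfl, List.range_succ, List.filter_append, h1]
  simp [Nat.or_self, Nat.xor_self]

theorem pvSub_succ_false {i m : Nat} (h : m.testBit i = false) :
    pvSub (i + 1) m = pvSub i m := by
  unfold pvSub
  apply List.filter_congr
  intro t _
  by_cases ho : t ||| m = m
  · simp only [ho, decide_true, Bool.true_and]
    apply decide_eq_decide.mpr
    constructor
    · intro h1
      rw [pvShiftR_zero] at h1 ⊢
      intro j hj
      by_cases hji : j = i
      · subst hji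
        rw [Nat.testBit_xor]
        cases hti : t.testBit j
        · simp [h]
        · exact absurd (pvOr_sub ho hti) (by simp [h])
      · exact h1 j (by omega)
    · intro h1
      rw [pvShiftR_zero] at h1 ⊢
      intro j hj
      exact h1 j (by omega)
  · simp [ho]

theorem pvXor_lt {k i : Nat} (h : k.testBit i = true) : k ^^^ 2 ^ i < k := by
  refine Nat.lt_of_testBit i ?_ h ?_
  · simp [Nat.testBit_xor, Nat.testBit_two_pow, h]
  · intro j hj
    rw [Nat.testBit_xor, Nat.testBit_two_pow, decide_eq_false (by omega), Bool.xor_false]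

theorem pvXor_testBit_self {k i : Nat} : (k ^^^ 2 ^ i).testBit i = !k.testBit i := by
  simp [Nat.testBit_xor, Nat.testBit_two_pow]

theorem pvXor_testBit_ne {k i j : Nat} (hj : j ≠ i) : (k ^^^ 2 ^ i).testBit j = k.testBit j := by
  rw [Nat.testBit_xor, Nat.testBit_two_pow, decide_eq_false (fun hh => hj hh.symm), Bool.xor_false]

theorem pvSub_succ_true_hi {i m : Nat} (h : m.testBit i = true) :
    (List.range (m + 1)).filter
        (fun t => t.testBit i &&
          (decide (t ||| m = m) && decide ((t ^^^ m) >>> (i + 1) = 0))) = pvSub i m := by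
  unfold pvSub
  apply List.filter_congr
  intro t _
  by_cases ho : t ||| m = m
  · simp only [ho, decide_true, Bool.true_and, Bool.and_true]
    cases hti : t.testBit i
    · simp only [Bool.false_and]
      have : ¬ (t ^^^ m) >>> i = 0 := by
        intro h0
        have := (pvShiftR_zero _ i).mp h0 i le_rfl
        rw [Nat.testBit_xor, hti, h] at this
        simp at this
      simp [this]
    · simp only [Bool.true_and]
      apply decide_eq_decide.mpr
      constructor
      · intro h1
        rw [pvShiftR_zero] at h1 ⊢
        intro j hj
        by_cases hji : j = i
        · subst hji
          rw [Nat.testBit_xor, hti, h]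
          rfl
        · exact h1 j (by omega)
      · intro h1
        rw [pvShiftR_zero] at h1 ⊢
        intro j hj
        exact h1 j (by omega)
  · simp [ho]

theorem pvSub_succ_true_lo {i m : Nat} (h : m.testBit i = true) :
    (List.range (m + 1)).filter
        (fun t => !t.testBit i &&
          (decide (t ||| m = m) && decide ((t ^^^ m) >>> (i + 1) = 0))) = pvSub i (m ^^^ 2 ^ i) := by
  have hmi : (m ^^^ 2 ^ i).testBit i = false := by rw [pvXor_testBit_self, h]; rfl
  have hlt : m ^^^ 2 ^ i < m := pvXor_lt h
  have hcong : ∀ t : Nat,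
      (!t.testBit i && (decide (t ||| m = m) && decide ((t ^^^ m) >>> (i + 1) = 0))) =
      (decide (t ||| (m ^^^ 2 ^ i) = m ^^^ 2 ^ i) && decide ((t ^^^ (m ^^^ 2 ^ i)) >>> i = 0)) := by
    intro t
    cases hti : t.testBit i
    · simp only [Bool.not_false, Bool.true_and]
      rw [show (decide (t ||| m = m) && decide ((t ^^^ m) >>> (i + 1) = 0)) =
            decide ((t ||| m = m) ∧ (t ^^^ m) >>> (i + 1) = 0) by simp,
          show (decide (t ||| (m ^^^ 2 ^ i) = m ^^^ 2 ^ i) && decide ((t ^^^ (m ^^^ 2 ^ i)) >>> i = 0)) =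
            decide ((t ||| (m ^^^ 2 ^ i) = m ^^^ 2 ^ i) ∧ (t ^^^ (m ^^^ 2 ^ i)) >>> i = 0) by simp]
      apply decide_eq_decide.mpr
      constructor
      · rintro ⟨ho, hs⟩
        constructor
        · apply Nat.eq_of_testBit_eq
          intro j
          rw [Nat.testBit_or]
          by_cases hji : j = i
          · subst hji; rw [hti, hmi]; rfl
          · rw [pvXor_testBit_ne hji, ← Nat.testBit_or, ho]
        · rw [pvShiftR_zero]
          intro j hj
          rw [Nat.testBit_xor]
          by_cases hji : j = i
          · subst hji; rw [hti, hmi]; rfl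
          · rw [pvXor_testBit_ne hji, ← Nat.testBit_xor]
            exact (pvShiftR_zero _ _).mp hs j (by omega)
      · rintro ⟨ho, hs⟩
        constructor
        · apply Nat.eq_of_testBit_eq
          intro j
          rw [Nat.testBit_or]
          by_cases hji : j = i
          · subst hji; rw [hti, h]; rfl
          · have hoj : ((t ||| (m ^^^ 2 ^ i))).testBit j = (m ^^^ 2 ^ i).testBit j := by
              rw [ho]
            rw [Nat.testBit_or, pvXor_testBit_ne hji] at hoj
            exact hoj
        · rw [pvShiftR_zero]
          intro j hj
          rw [Nat.testBit_xor, ← pvXor_testBit_ne (k := m) (i := i) (by omega : j ≠ i),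
            ← Nat.testBit_xor]
          exact (pvShiftR_zero _ _).mp hs j (by omega)
    · simp only [Bool.not_true, Bool.false_and]
      have : ¬ t ||| (m ^^^ 2 ^ i) = m ^^^ 2 ^ i := by
        intro ho
        have := pvOr_sub ho hti
        rw [hmi] at this
        exact absurd this (by simp)
      simp [this]
  rw [List.filter_congr (fun t _ => hcong t)]
  unfold pvSub
  rw [show m + 1 = ((m ^^^ 2 ^ i) + 1) + (m - (m ^^^ 2 ^ i)) by omega,
    List.range_add, List.filter_append]
  have h2 : ((List.range (m - (m ^^^ 2 ^ i))).map (fun x => (m ^^^ 2 ^ i) + 1 + x)).filter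
      (fun t => decide (t ||| (m ^^^ 2 ^ i) = m ^^^ 2 ^ i) && decide ((t ^^^ (m ^^^ 2 ^ i)) >>> i = 0)) = [] := by
    rw [List.filter_eq_nil_iff]
    intro t ht
    obtain ⟨x, _, rfl⟩ := List.mem_map.mp ht
    simp only [Bool.and_eq_true, decide_eq_true_eq, not_and]
    intro ho _
    have hle := Nat.left_le_or (n := (m ^^^ 2 ^ i) + 1 + x) (m := m ^^^ 2 ^ i)
    rw [ho] at hle
    omega
  rw [h2, List.append_nil]

theorem pvSub_split {i m : Nat} (h : m.testBit i = true) :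
    (pvSub i m ++ pvSub i (m ^^^ 2 ^ i)).Perm (pvSub (i + 1) m) := by
  have hp := List.filter_append_perm (fun t => t.testBit i) (pvSub (i + 1) m)
  rw [show List.filter (fun t => t.testBit i) (pvSub (i + 1) m) = pvSub i m from by
      unfold pvSub; rw [List.filter_filter]; exact pvSub_succ_true_hi h,
    show List.filter (fun t => !t.testBit i) (pvSub (i + 1) m) = pvSub i (m ^^^ 2 ^ i) from by
      unfold pvSub; rw [List.filter_filter]; exact pvSub_succ_true_lo h] at hp
  exact hp

theorem pvSub_succ_true (vec : List Int) {i m : Nat} (h : m.testBit i = true) :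
    pvXorL vec (pvSub (i + 1) m) =
      PySem.Int.bxor (pvXorL vec (pvSub i m)) (pvXorL vec (pvSub i (m ^^^ 2 ^ i))) := by
  rw [← pvXorL_perm vec (pvSub_split h), pvXorL_append]

-- the sequential in-place pass acts pointwise (reads are from entries the pass never writes)
def pvNew (i : Nat) (a : List Int) (m : Nat) : Int :=
  if m.testBit i then PySem.Int.bxor (a.getD m 0) (a.getD (m ^^^ 2 ^ i) 0) else a.getD m 0

theorem pvUpd_eq (i : Nat) (a : List Int) (mask : Nat) :
    pvUpd i a mask = if mask.testBit i = true then
      a.set mask (PySem.Int.bxor (a.getD mask 0) (a.getD (mask ^^^ 2 ^ i) 0)) else a := by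
  unfold pvUpd
  rw [Nat.one_shiftLeft]
  by_cases hb : mask.testBit i
  · rw [if_pos hb, if_pos]
    rw [Nat.and_two_pow, hb]
    simpa using (Nat.two_pow_pos i).ne'
  · have hb' : mask.testBit i = false := by simpa using hb
    rw [if_neg (by simp [Nat.and_two_pow, hb']), if_neg (by simp [hb'])]

theorem pvFoldl_upd_length (i : Nat) (l : List Nat) (a : List Int) :
    (l.foldl (pvUpd i) a).length = a.length := by
  induction l generalizing a with
  | nil => rfl
  | cons x l ih =>
      rw [List.foldl_cons, ih, pvUpd_eq]
      split <;> simp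

theorem pvGetD_set (l : List Int) (k : Nat) (v : Int) (m : Nat) (hk : k < l.length) :
    (l.set k v).getD m 0 = if k = m then v else l.getD m 0 := by
  simp only [List.getD_eq_getElem?_getD, List.getElem?_set]
  split
  · next heq => subst heq; simp [hk]
  · rfl

theorem pvPartial (i : Nat) (a : List Int) :
    ∀ k, k ≤ a.length → ∀ m,
      ((List.range k).foldl (pvUpd i) a).getD m 0 =
        if m < k then pvNew i a m else a.getD m 0 := by
  intro k
  induction k with
  | zero => intro _ m; simp
  | succ k ih =>
      intro hk m
      have hk' : k ≤ a.length := by omega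
      have hlen : ((List.range k).foldl (pvUpd i) a).length = a.length :=
        pvFoldl_upd_length i _ a
      rw [List.range_succ, List.foldl_append, List.foldl_cons, List.foldl_nil, pvUpd_eq]
      by_cases hb : k.testBit i
      · rw [if_pos hb]
        have e1 : ((List.range k).foldl (pvUpd i) a).getD k 0 = a.getD k 0 := by
          rw [ih hk' k]; simp
        have e2 : ((List.range k).foldl (pvUpd i) a).getD (k ^^^ 2 ^ i) 0 =
            a.getD (k ^^^ 2 ^ i) 0 := by
          rw [ih hk' (k ^^^ 2 ^ i)]
          split
          · unfold pvNew
            rw [if_neg (by rw [pvXor_testBit_self, hb]; simp)]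
          · rfl
        rw [e1, e2, pvGetD_set _ k _ m (by omega)]
        by_cases hkm : k = m
        · subst hkm
          rw [if_pos rfl, if_pos (by omega)]
          unfold pvNew
          rw [if_pos hb]
        · rw [if_neg hkm, ih hk' m]
          by_cases hmk : m < k
          · rw [if_pos hmk, if_pos (by omega)]
          · rw [if_neg hmk, if_neg (by omega)]
      · rw [if_neg hb, ih hk' m]
        by_cases hmk : m < k
        · rw [if_pos hmk, if_pos (by omega)]
        · by_cases hmk2 : m = k
          · subst hmk2
            rw [if_neg hmk, if_pos (by omega)]
            unfold pvNew
            rw [if_neg hb]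
          · rw [if_neg hmk, if_neg (by omega)]

theorem pvPass_getD (i : Nat) (a : List Int) (m : Nat) (hm : m < a.length) :
    (pvPass i a).getD m 0 = pvNew i a m := by
  unfold pvPass
  rw [pvPartial i a a.length le_rfl m, if_pos hm]

theorem pvPass_length (i : Nat) (a : List Int) : (pvPass i a).length = a.length :=
  pvFoldl_upd_length i _ a

-- main invariant: after j butterfly passes, entry m is the XOR over pvSub j m
theorem pvIter (vec : List Int) (j : Nat) :
    ((List.range j).foldl (fun a i => pvPass i a) vec).length = vec.length ∧
      ∀ m, m < vec.length →
        ((List.range j).foldl (fun a i => pvPass i a) vec).getD m 0 = pvXorL vec (pvSub j m) := by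
  induction j with
  | zero =>
      refine ⟨rfl, fun m hm => ?_⟩
      rw [pvSub_zero]
      simp [pvXorL, pvZero_bxor]
  | succ j ih =>
      obtain ⟨ihl, ihv⟩ := ih
      rw [List.range_succ, List.foldl_append, List.foldl_cons, List.foldl_nil]
      refine ⟨by rw [pvPass_length, ihl], fun m hm => ?_⟩
      rw [pvPass_getD j _ m (by rw [ihl]; exact hm)]
      unfold pvNew
      by_cases hb : m.testBit j
      · rw [if_pos hb, ihv m hm, ihv (m ^^^ 2 ^ j) (lt_trans (pvXor_lt hb) hm),
          pvSub_succ_true vec hb]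
      · rw [if_neg hb, ihv m hm, pvSub_succ_false (by simpa using hb)]

-- B's submask list is a permutation of pvSub n m
theorem pvShift_and_one (m j : Nat) : ((m >>> j) &&& 1 ≠ 0) ↔ m.testBit j = true := by
  rw [Nat.and_one_is_mod,
    show m.testBit j = (m >>> j).testBit 0 from by simp [Nat.testBit_shiftRight],
    Nat.testBit_zero]
  constructor
  · intro h
    exact decide_eq_true (by omega)
  · intro h
    have := of_decide_eq_true h
    omega

theorem pvXor_swap (a b c : Nat) : (a ^^^ c) ^^^ (b ^^^ c) = a ^^^ b := by
  apply Nat.eq_of_testBit_eq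
  intro j
  simp only [Nat.testBit_xor]
  cases a.testBit j <;> cases b.testBit j <;> cases c.testBit j <;> rfl

theorem pvXor_move (a b c : Nat) : (a ^^^ c) ^^^ b = a ^^^ (b ^^^ c) := by
  apply Nat.eq_of_testBit_eq
  intro j
  simp only [Nat.testBit_xor]
  cases a.testBit j <;> cases b.testBit j <;> cases c.testBit j <;> rfl

theorem pvSub_nodup (i m : Nat) : (pvSub i m).Nodup :=
  List.Nodup.filter _ List.nodup_range

theorem pvMem_sub {i m t : Nat} :
    t ∈ pvSub i m ↔ (t ||| m = m ∧ (t ^^^ m) >>> i = 0) := by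
  unfold pvSub
  rw [List.mem_filter, List.mem_range]
  constructor
  · rintro ⟨_, hb⟩
    simpa using hb
  · rintro ⟨ho, hs⟩
    have hle : t ≤ t ||| m := Nat.left_le_or
    rw [ho] at hle
    exact ⟨by omega, by simp [ho, hs]⟩

theorem pvMap_lo {i m : Nat} (h : m.testBit i = true) :
    ((pvSub i m).map (fun t => t ^^^ 2 ^ i)).Perm (pvSub i (m ^^^ 2 ^ i)) := by
  have hmi : (m ^^^ 2 ^ i).testBit i = false := by rw [pvXor_testBit_self, h]; rfl
  apply (List.perm_ext_iff_of_nodup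
    (List.Nodup.map (fun a b hab => by
      have : a ^^^ 2 ^ i ^^^ 2 ^ i = b ^^^ 2 ^ i ^^^ 2 ^ i := by rw [hab]
      rwa [Nat.xor_cancel_right, Nat.xor_cancel_right] at this) (pvSub_nodup i m))
    (pvSub_nodup i (m ^^^ 2 ^ i))).mpr
  intro u
  rw [List.mem_map]
  constructor
  · rintro ⟨t, ht, rfl⟩
    obtain ⟨ho, hs⟩ := pvMem_sub.mp ht
    rw [show t ^^^ m = (t ^^^ 2 ^ i) ^^^ (m ^^^ 2 ^ i) from (pvXor_swap t m (2 ^ i)).symm] at hs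
    refine pvMem_sub.mpr ⟨?_, hs⟩
    have hui : (t ^^^ 2 ^ i).testBit i = false := by
      have := (pvShiftR_zero _ i).mp hs i le_rfl
      rw [Nat.testBit_xor, hmi, Bool.xor_false] at this
      exact this
    apply Nat.eq_of_testBit_eq
    intro j
    rw [Nat.testBit_or]
    by_cases hji : j = i
    · subst hji; rw [hui, hmi]; rfl
    · rw [pvXor_testBit_ne hji, pvXor_testBit_ne hji, ← Nat.testBit_or, ho]
  · intro hu
    obtain ⟨ho, hs⟩ := pvMem_sub.mp hu
    refine ⟨u ^^^ 2 ^ i, ?_, by rw [Nat.xor_cancel_right]⟩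
    have hx : (u ^^^ 2 ^ i) ^^^ m = u ^^^ (m ^^^ 2 ^ i) := pvXor_move u m (2 ^ i)
    have hui : u.testBit i = false := by
      have := (pvShiftR_zero _ i).mp hs i le_rfl
      rw [Nat.testBit_xor, hmi, Bool.xor_false] at this
      exact this
    refine pvMem_sub.mpr ⟨?_, by rw [hx]; exact hs⟩
    apply Nat.eq_of_testBit_eq
    intro j
    rw [Nat.testBit_or]
    by_cases hji : j = i
    · subst hji; rw [pvXor_testBit_self, hui, h]; rfl
    · have h1 : (u ||| (m ^^^ 2 ^ i)).testBit j = (m ^^^ 2 ^ i).testBit j := by rw [ho]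
      rw [Nat.testBit_or, pvXor_testBit_ne hji] at h1
      rw [pvXor_testBit_ne hji]
      exact h1

theorem pvSubs_perm (m : Nat) (j : Nat) :
    ((List.range j).foldl (fun subs j =>
      if (m >>> j) &&& 1 ≠ 0 then subs ++ subs.map (fun t => t ^^^ (1 <<< j)) else subs)
      [m]).Perm (pvSub j m) := by
  induction j with
  | zero =>
      rw [pvSub_zero, List.range_zero, List.foldl_nil]
  | succ j ih =>
      rw [List.range_succ, List.foldl_append, List.foldl_cons, List.foldl_nil]
      by_cases hb : m.testBit j
      · rw [if_pos ((pvShift_and_one m j).mpr hb), Nat.one_shiftLeft]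
        exact ((ih.append (ih.map _)).trans
          ((List.Perm.refl _).append (pvMap_lo hb))).trans (pvSub_split hb)
      · rw [if_neg (fun hc => hb ((pvShift_and_one m j).mp hc)),
          pvSub_succ_false (by simpa using hb)]
        exact ih

-- ===== VERDICT (by name: the statement is the Claim_ definition above) =====
theorem mobius_transform_spec : Claim_equal_mobius_transform := by
  intro vec _
  unfold Spec_mobius_transform mobius_transform mobius_transform_alt
  obtain ⟨hl, hv⟩ := pvIter vec (PySem.Int.bitLength (vec.length : Int) - 1)
  apply List.ext_getElem (by simpa using hl)
  intro m h1 h2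
  have hm : m < vec.length := by rw [← hl]; simpa using h1
  rw [List.getElem_map, List.getElem_range]
  rw [show ((List.range (PySem.Int.bitLength (vec.length : Int) - 1)).foldl
        (fun a i => pvPass i a) vec)[m] =
      ((List.range (PySem.Int.bitLength (vec.length : Int) - 1)).foldl
        (fun a i => pvPass i a) vec).getD m 0 by
    rw [List.getD_eq_getElem?_getD, List.getElem?_eq_getElem h1]
    rfl]
  rw [hv m hm]
  exact (pvXorL_perm vec (pvSubs_perm m (PySem.Int.bitLength (vec.length : Int) - 1))).symm
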